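-- pv_equiv track=rewrite | github.com/maksymhonchar/Fun | Python/pyworkout/comprehensions/ex34.py | get_sv
-- ===== SOURCE A (Python) =====
-- def get_sv(
--     data: str
-- ) -> list:
--     vowels = {'a', 'e', 'i', 'o', 'u'}
--     return [
--         word
--         for word in data.split('\n')
--         if all([vowel in word.lower() for vowel in vowels])
--     ]
-- ===== SOURCE B (Python) =====
-- def _vowel_bit(ch):
--     c = ch.lower()
--     if c == 'a':
--         return 1
--     if c == 'e':
--         return 2
--     if c == 'i':
--         return 4
--     if c == 'o':
--         return 8
--     if c == 'u':
--         return 16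
--     return 0
--
--
-- def get_sv(data):
--     result = []
--     cur = []
--     mask = 0
--     for ch in data:
--         if ch == '\n':
--             if mask == 31:
--                 result.append(''.join(cur))
--             cur = []
--             mask = 0
--         else:
--             cur.append(ch)
--             mask |= _vowel_bit(ch)
--     if mask == 31:
--         result.append(''.join(cur))
--     return result
-- ===== Notes on version B (the rewrite author's own statement) =====
-- stated objective: alternative
-- what changed: B never splits the input and never scans a line per vowel: it streams over data's characters once, maintaining the current line and a 5-bit vowel mask, emitting the line at each newline (and at the end) iff the mask is full.
import Mathlib
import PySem

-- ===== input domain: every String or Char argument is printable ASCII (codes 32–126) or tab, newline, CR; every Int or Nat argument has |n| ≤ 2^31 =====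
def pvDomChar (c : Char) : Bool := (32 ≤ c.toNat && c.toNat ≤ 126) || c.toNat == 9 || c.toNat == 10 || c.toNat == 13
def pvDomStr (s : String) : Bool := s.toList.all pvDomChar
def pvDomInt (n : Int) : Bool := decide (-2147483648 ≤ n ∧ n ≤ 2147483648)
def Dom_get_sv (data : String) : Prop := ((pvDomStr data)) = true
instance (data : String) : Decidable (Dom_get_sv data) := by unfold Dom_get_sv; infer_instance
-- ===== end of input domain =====

-- B replaces A's split-then-filter (five substring scans of each line) by a single streaming
-- pass over the characters, maintaining the current line and a 5-bit vowel mask (alternative; same cost class).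


-- ===== PORT A =====
-- vowels = {'a','e','i','o','u'}; [word for word in data.split('\n') if all([vowel in word.lower() for vowel in vowels])]
-- (the set is only iterated under all(), so its iteration order cannot affect the result)
def get_sv (data : String) : List String :=
  let vowels : PySem.Set String := PySem.Set.ofList ["a", "e", "i", "o", "u"]
  ((PySem.Chars.splitOn data.toList "\n".toList).map String.ofList).filter
    (fun word => (vowels.map (fun vowel => PySem.Str.isIn vowel (PySem.Str.lower word))).all (fun b => b))

-- ===== PORT B =====
-- helper _vowel_bit(ch): c = ch.lower(); if-chain returning the vowel's bit, else 0
def vowelBit (ch : Char) : Int :=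
  let c := PySem.Chars.lower [ch]
  if c = ['a'] then 1
  else if c = ['e'] then 2
  else if c = ['i'] then 4
  else if c = ['o'] then 8
  else if c = ['u'] then 16
  else 0

-- the for-loop of get_sv in Source B: state (result, cur, mask); final flush after the loop
def scanLines : List Char → List String → List Char → Int → List String
  | [], result, cur, mask => if mask == 31 then result ++ [String.ofList cur] else result
  | ch :: rest, result, cur, mask =>
      if ch = '\n' then
        scanLines rest (if mask == 31 then result ++ [String.ofList cur] else result) [] 0
      else
        scanLines rest result (cur ++ [ch]) (PySem.Int.bor mask (vowelBit ch))

def get_sv_alt (data : String) : List String :=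
  scanLines data.toList [] [] 0

-- ===== PRECONDITION & SPEC =====
def Spec_get_sv (data : String) (out : List String) : Prop := out = get_sv_alt data
instance (data : String) (out : List String) : Decidable (Spec_get_sv data out) := by unfold Spec_get_sv; infer_instance

-- ===== CLAIM (what is proved, stated in full; the proofs are below) =====
def Claim_equal_get_sv : Prop := ∀ (data : String), Dom_get_sv data → Spec_get_sv data (get_sv data)

-- ===== LEMMAS AND PROOFS =====

-- the lines of a character list, recursively (head-extension form)
def consHead (p : List Char) : List (List Char) → List (List Char)
  | [] => [p]
  | h :: t => (p ++ h) :: t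

def linesSpec : List Char → List (List Char)
  | [] => [[]]
  | c :: cs => if c = '\n' then [] :: linesSpec cs else consHead [c] (linesSpec cs)

theorem linesSpec_ne_nil (cs : List Char) : linesSpec cs ≠ [] := by
  cases cs with
  | nil => simp [linesSpec]
  | cons c cs =>
    simp only [linesSpec]
    split
    · simp
    · cases h : linesSpec cs <;> simp [consHead]

theorem consHead_nil (xs : List (List Char)) (h : xs ≠ []) : consHead [] xs = xs := by
  cases xs with
  | nil => exact absurd rfl h
  | cons a t => simp [consHead]

theorem consHead_consHead (p : List Char) (c : Char) (xs : List (List Char)) :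
    consHead p (consHead [c] xs) = consHead (p ++ [c]) xs := by
  cases xs <;> simp [consHead]

-- splitOn.go with enough fuel computes acc.reverse ++ consHead cur.reverse (linesSpec l)
theorem splitOn_go_eq (l : List Char) : ∀ (fuel : Nat) (cur : List Char) (acc : List (List Char)),
    l.length < fuel →
    PySem.Chars.splitOn.go ['\n'] fuel l cur acc = acc.reverse ++ consHead cur.reverse (linesSpec l) := by
  induction l with
  | nil =>
    intro fuel cur acc h
    match fuel, h with
    | fuel + 1, _ =>
      simp [PySem.Chars.splitOn.go, linesSpec, consHead]
  | cons c rest ih =>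
    intro fuel cur acc h
    match fuel, h with
    | fuel + 1, h =>
      rw [PySem.Chars.splitOn.go]
      by_cases hc : c = '\n'
      · subst hc
        simp only [List.isPrefixOf, BEq.rfl, Bool.true_and, if_pos]
        rw [show List.drop ['\n'].length ('\n' :: rest) = rest from rfl]
        rw [ih fuel [] (cur.reverse :: acc) (by simpa using h)]
        rcases hr : linesSpec rest with _ | ⟨h0, t0⟩
        · exact absurd hr (linesSpec_ne_nil rest)
        · simp [linesSpec, consHead, hr]
      · have hpre : (['\n'].isPrefixOf (c :: rest)) = false := by
          simp [List.isPrefixOf]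
          intro hh; exact absurd hh.symm hc
        simp only [hpre, Bool.false_eq_true, if_false]
        rw [ih fuel (c :: cur) acc (by simpa using h)]
        simp [linesSpec, hc, consHead_consHead]

theorem splitOn_eq_linesSpec (s : List Char) :
    PySem.Chars.splitOn s ['\n'] = linesSpec s := by
  show PySem.Chars.splitOn.go ['\n'] (s.length + 1) s [] [] = _
  rw [splitOn_go_eq s (s.length + 1) [] [] (by omega)]
  simp [consHead_nil _ (linesSpec_ne_nil s)]

-- vowel indicator and the mask's closed form
def ind (v : Char) (l : List Char) : Bool := (PySem.Chars.lower l).contains v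

def maskSpec (l : List Char) : Int :=
  PySem.Int.bor (PySem.Int.bor (PySem.Int.bor (PySem.Int.bor
    (cond (ind 'a' l) 1 0) (cond (ind 'e' l) 2 0)) (cond (ind 'i' l) 4 0))
    (cond (ind 'o' l) 8 0)) (cond (ind 'u' l) 16 0)

theorem vowelBit_nonneg (c : Char) : 0 ≤ vowelBit c := by
  unfold vowelBit; dsimp only; split_ifs <;> decide

theorem maskSpec_nonneg (l : List Char) : 0 ≤ maskSpec l := by
  unfold maskSpec
  cases ind 'a' l <;> cases ind 'e' l <;> cases ind 'i' l <;> cases ind 'o' l <;> cases ind 'u' l <;> decide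

theorem bor_nonneg (a b : Int) (ha : 0 ≤ a) (hb : 0 ≤ b) : 0 ≤ PySem.Int.bor a b := by
  rw [PySem.Int.bor_of_nonneg ha hb]; positivity

theorem bor_assoc3 (a b c : Int) (ha : 0 ≤ a) (hb : 0 ≤ b) (hc : 0 ≤ c) :
    PySem.Int.bor (PySem.Int.bor a b) c = PySem.Int.bor a (PySem.Int.bor b c) := by
  rw [PySem.Int.bor_of_nonneg ha hb, PySem.Int.bor_of_nonneg hb hc,
      PySem.Int.bor_of_nonneg ha (by positivity), PySem.Int.bor_of_nonneg (by positivity) hc]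
  simp [Nat.or_assoc]

theorem ind_cons (v : Char) (c : Char) (l : List Char) :
    ind v (c :: l) = (decide (v = PySem.Chars.lowerChar c) || ind v l) := by
  simp [ind, PySem.Chars.lower]

theorem vowelBit_bor_maskSpec (c : Char) (l : List Char) :
    PySem.Int.bor (vowelBit c) (maskSpec l) = maskSpec (c :: l) := by
  have hlc : PySem.Chars.lower [c] = [PySem.Chars.lowerChar c] := by simp [PySem.Chars.lower]
  unfold maskSpec vowelBit
  simp only [hlc, ind_cons]
  generalize PySem.Chars.lowerChar c = lc
  by_cases h1 : lc = 'a'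
  case pos =>
    subst h1
    cases ind 'a' l <;> cases ind 'e' l <;> cases ind 'i' l <;> cases ind 'o' l <;> cases ind 'u' l <;> decide
  all_goals by_cases h2 : lc = 'e'
  case pos =>
    subst h2
    cases ind 'a' l <;> cases ind 'e' l <;> cases ind 'i' l <;> cases ind 'o' l <;> cases ind 'u' l <;> decide
  all_goals by_cases h3 : lc = 'i'
  case pos =>
    subst h3
    cases ind 'a' l <;> cases ind 'e' l <;> cases ind 'i' l <;> cases ind 'o' l <;> cases ind 'u' l <;> decide
  all_goals by_cases h4 : lc = 'o'
  case pos =>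
    subst h4
    cases ind 'a' l <;> cases ind 'e' l <;> cases ind 'i' l <;> cases ind 'o' l <;> cases ind 'u' l <;> decide
  all_goals by_cases h5 : lc = 'u'
  case pos =>
    subst h5
    cases ind 'a' l <;> cases ind 'e' l <;> cases ind 'i' l <;> cases ind 'o' l <;> cases ind 'u' l <;> decide
  all_goals
    simp only [List.cons.injEq, and_true, h1, h2, h3, h4, h5, Ne.symm h1, Ne.symm h2, Ne.symm h3,
      Ne.symm h4, Ne.symm h5, decide_false, Bool.false_or, ite_false]
    cases ind 'a' l <;> cases ind 'e' l <;> cases ind 'i' l <;> cases ind 'o' l <;> cases ind 'u' l <;> decide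

def maskFold (m : Int) (l : List Char) : Int :=
  l.foldl (fun m c => PySem.Int.bor m (vowelBit c)) m

theorem maskFold_eq (l : List Char) : ∀ m : Int, 0 ≤ m →
    maskFold m l = PySem.Int.bor m (maskSpec l) := by
  induction l with
  | nil =>
    intro m hm
    simp [maskFold, maskSpec, ind, PySem.Int.bor_of_nonneg hm (by decide : (0:Int) ≤ 0),
      PySem.Chars.lower, Int.toNat_of_nonneg hm]
  | cons c l ih =>
    intro m hm
    have h1 : maskFold m (c :: l) = maskFold (PySem.Int.bor m (vowelBit c)) l := by
      simp [maskFold, List.foldl_cons]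
    rw [h1, ih _ (bor_nonneg _ _ hm (vowelBit_nonneg c)),
        bor_assoc3 _ _ _ hm (vowelBit_nonneg c) (maskSpec_nonneg l), vowelBit_bor_maskSpec]

theorem maskFold_append (m : Int) (l : List Char) (c : Char) :
    maskFold m (l ++ [c]) = PySem.Int.bor (maskFold m l) (vowelBit c) := by
  simp [maskFold, List.foldl_append]

-- the per-line predicates agree
theorem predA_eq_mask (l : List Char) :
    ((PySem.Set.ofList ["a", "e", "i", "o", "u"] : PySem.Set String).map
        (fun vowel => PySem.Str.isIn vowel (PySem.Str.lower (String.ofList l)))).all (fun b => b)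
      = (maskFold 0 l == 31) := by
  have h0 : maskFold 0 l = maskSpec l := by
    rw [maskFold_eq l 0 (by decide), PySem.Int.bor_comm]
    have := maskSpec_nonneg l
    rw [PySem.Int.bor_of_nonneg this (by decide)]
    simp [Int.toNat_of_nonneg this]
  have hof : (PySem.Set.ofList ["a", "e", "i", "o", "u"] : PySem.Set String)
      = ["a", "e", "i", "o", "u"] := by decide
  rw [h0, hof, Bool.eq_iff_iff]
  simp only [List.map, List.all_cons, List.all_nil, Bool.and_true, Bool.and_eq_true,
    PySem.Str.isIn_iff_infix]
  have htl : (String.ofList l).toList = l := by simp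
  have hmem : ∀ v : Char, ([v] <:+: (PySem.Str.lower (String.ofList l)).toList) ↔ ind v l = true := by
    intro v
    rw [PySem.Str.toList_lower, htl, List.singleton_infix_iff]
    simp [ind]
  have ha := hmem 'a'; have he := hmem 'e'; have hi := hmem 'i'; have ho := hmem 'o'; have hu := hmem 'u'
  constructor
  · rintro ⟨h1, h2, h3, h4, h5⟩
    have e1 := ha.mp h1; have e2 := he.mp h2; have e3 := hi.mp h3; have e4 := ho.mp h4; have e5 := hu.mp h5
    unfold maskSpec; rw [e1, e2, e3, e4, e5]; decide
  · intro h
    unfold maskSpec at h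
    refine ⟨ha.mpr ?_, he.mpr ?_, hi.mpr ?_, ho.mpr ?_, hu.mpr ?_⟩ <;>
    · revert h
      cases ind 'a' l <;> cases ind 'e' l <;> cases ind 'i' l <;> cases ind 'o' l <;> cases ind 'u' l <;> decide

-- the streaming scan computes the filtered lines
theorem scanLines_eq (cs : List Char) : ∀ (res : List String) (cur : List Char),
    scanLines cs res cur (maskFold 0 cur)
      = res ++ ((consHead cur (linesSpec cs)).filter (fun l => maskFold 0 l == 31)).map String.ofList := by
  induction cs with
  | nil =>
    intro res cur
    simp only [scanLines, linesSpec, consHead, List.append_nil]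
    by_cases h : (maskFold 0 cur == 31) = true <;> simp [h, List.filter]
  | cons c rest ih =>
    intro res cur
    by_cases hc : c = '\n'
    · subst hc
      have hih := ih (if (maskFold 0 cur == 31) = true then res ++ [String.ofList cur] else res) []
      simp only [show maskFold (0 : Int) [] = (0 : Int) from rfl] at hih
      simp only [scanLines, linesSpec, ite_true]
      rw [hih, consHead_nil _ (linesSpec_ne_nil rest)]
      have hch : consHead cur ([] :: linesSpec rest) = cur :: linesSpec rest := by simp [consHead]
      rw [hch, List.filter_cons]
      by_cases h : (maskFold 0 cur == 31) = true <;> simp [h]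
    · simp only [scanLines, linesSpec, if_neg hc]
      rw [← maskFold_append, ih res (cur ++ [c]), consHead_consHead]

-- ===== VERDICT (by name: the statement is the Claim_ definition above) =====
theorem get_sv_spec : Claim_equal_get_sv := by
  intro data _
  unfold Spec_get_sv get_sv get_sv_alt
  have hsep : "\n".toList = ['\n'] := by decide
  rw [hsep, splitOn_eq_linesSpec]
  have hb : scanLines data.toList [] [] 0
      = ((linesSpec data.toList).filter (fun l => maskFold 0 l == 31)).map String.ofList := by
    have hih := scanLines_eq data.toList [] []
    simp only [show maskFold (0 : Int) [] = (0 : Int) from rfl] at hih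
    rw [hih, consHead_nil _ (linesSpec_ne_nil data.toList)]
    simp
  rw [hb, List.filter_map]
  exact congrArg (List.map String.ofList)
    (List.filter_congr (fun l _ => by simpa using predA_eq_mask l))
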